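-- pv_equiv track=rewrite | github.com/tejjeenu/Leetcode-RAG-Agent-AI-API | app.py | get_topic_ancestors
-- ===== SOURCE A (Python) =====
-- leetcode_topic_tree = {
--     'intervals': ['heaps/priority queues'],
--     'greedy algorithms': ['heaps/priority queues'],
--     'advanced graphs': ['heaps/priority queues', 'graphs'],
--     'math & geometry': ['bit manipulation', 'graphs'],
--     '2D dynamic programming': ['1D dynamic programming', 'graphs'],
--     'bit manipulation': ['1D dynamic programming'],
--     'heaps/priority queues': ['trees'],
--     'graphs': ['backtracking'],
--     '1D dynamic programming': ['backtracking'],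
--     'tries':['trees'],
--     'backtracking':['trees'],
--     'trees':['binary search', 'linked lists'],
--     'binary search': ['two pointers'],
--     'sliding window': ['two pointers'],
--     'linked lists': ['two pointers'],
--     'two pointers': ['arrays & hashing'],
--     'stacks': ['arrays & hashing'],
--     'arrays & hashing': []
-- }
--
-- def get_topic_ancestors(topics):
--
--     ancestors = []
--
--     def traversal(topic, level):
--
--         ancestors.append([level, topic])
--
--         for child in leetcode_topic_tree[topic]:
--             traversal(child, level + 1)
--
--     for topic in topics:
--         traversal(topic, 0)
--
--     # Sort the ancestors by level in descending order
--     ancestors.sort(key=lambda x: x[0], reverse=True)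
--     # Extract only the topic names from the sorted list
--     ancestors = [topic for level, topic in ancestors]
--     # Remove duplicates while maintaining order
--     seen = set()
--     ancestors = [x for x in ancestors if not (x in seen or seen.add(x))]
--
--     return ancestors
-- ===== SOURCE B (Python) =====
-- leetcode_topic_tree = {
--     'intervals': ['heaps/priority queues'],
--     'greedy algorithms': ['heaps/priority queues'],
--     'advanced graphs': ['heaps/priority queues', 'graphs'],
--     'math & geometry': ['bit manipulation', 'graphs'],
--     '2D dynamic programming': ['1D dynamic programming', 'graphs'],
--     'bit manipulation': ['1D dynamic programming'],
--     'heaps/priority queues': ['trees'],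
--     'graphs': ['backtracking'],
--     '1D dynamic programming': ['backtracking'],
--     'tries':['trees'],
--     'backtracking':['trees'],
--     'trees':['binary search', 'linked lists'],
--     'binary search': ['two pointers'],
--     'sliding window': ['two pointers'],
--     'linked lists': ['two pointers'],
--     'two pointers': ['arrays & hashing'],
--     'stacks': ['arrays & hashing'],
--     'arrays & hashing': []
-- }
--
-- def get_topic_ancestors(topics):
--     # Explicit stack-based DFS instead of recursion; dict.fromkeys for the dedup.
--     ancestors = []
--     for topic in topics:
--         stack = [(topic, 0)]
--         while stack:
--             t, level = stack.pop()
--             ancestors.append((level, t))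
--             for child in reversed(leetcode_topic_tree[t]):
--                 stack.append((child, level + 1))
--     ordered = sorted(ancestors, key=lambda x: x[0], reverse=True)
--     return list(dict.fromkeys(name for _, name in ordered))
-- ===== Notes on version B (the rewrite author's own statement) =====
-- stated objective: alternative
-- what changed: The recursive ancestor traversal is replaced by an explicit stack-based DFS (children pushed in reverse so pre-order insertion order is preserved) and the seen-set dedup comprehension by dict.fromkeys; the stable sort by level stays.
import Mathlib
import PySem

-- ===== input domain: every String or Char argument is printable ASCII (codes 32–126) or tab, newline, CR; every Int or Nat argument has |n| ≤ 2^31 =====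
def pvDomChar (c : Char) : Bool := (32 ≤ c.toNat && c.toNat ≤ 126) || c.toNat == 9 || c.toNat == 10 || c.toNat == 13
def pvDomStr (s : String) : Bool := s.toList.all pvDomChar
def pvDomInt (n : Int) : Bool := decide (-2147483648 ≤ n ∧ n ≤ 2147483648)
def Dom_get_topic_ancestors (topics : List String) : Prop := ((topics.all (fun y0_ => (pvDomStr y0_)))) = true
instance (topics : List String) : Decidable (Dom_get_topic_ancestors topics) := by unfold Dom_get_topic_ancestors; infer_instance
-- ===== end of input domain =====

-- B replaces the recursive traversal by an explicit stack-based DFS and the seen-set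
-- comprehension by dict.fromkeys; same cost, different decomposition (objective: alternative).
-- The module-level constant shared by both programs:
def leetcode_topic_tree : PySem.Dict String (List String) := PySem.Dict.ofList [
  ("intervals", ["heaps/priority queues"]),
  ("greedy algorithms", ["heaps/priority queues"]),
  ("advanced graphs", ["heaps/priority queues", "graphs"]),
  ("math & geometry", ["bit manipulation", "graphs"]),
  ("2D dynamic programming", ["1D dynamic programming", "graphs"]),
  ("bit manipulation", ["1D dynamic programming"]),
  ("heaps/priority queues", ["trees"]),
  ("graphs", ["backtracking"]),
  ("1D dynamic programming", ["backtracking"]),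
  ("tries", ["trees"]),
  ("backtracking", ["trees"]),
  ("trees", ["binary search", "linked lists"]),
  ("binary search", ["two pointers"]),
  ("sliding window", ["two pointers"]),
  ("linked lists", ["two pointers"]),
  ("two pointers", ["arrays & hashing"]),
  ("stacks", ["arrays & hashing"]),
  ("arrays & hashing", [])]

-- ===== PORT A =====
-- A's recursive `traversal`; the fuel only makes the recursion total — on keys of the fixed
-- DAG the deepest chain has 9 levels, so fuel 20 is never exhausted (Pre_ excludes non-keys,
-- where Python raises KeyError).
def travA (fuel : Nat) (topic : String) (level : Int) (acc : List (Int × String)) : List (Int × String) :=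
  match fuel with
  | 0 => acc
  | f + 1 =>
      (leetcode_topic_tree.getD topic []).foldl
        (fun a child => travA f child (level + 1) a) (acc ++ [(level, topic)])

-- A's dedup comprehension with the mutable `seen` set
def dedupSeenA (xs : List String) (seen : PySem.Set String) : List String :=
  match xs with
  | [] => []
  | x :: rest =>
      if PySem.Set.contains seen x then dedupSeenA rest seen
      else x :: dedupSeenA rest (PySem.Set.add seen x)

def get_topic_ancestors (topics : List String) : List String :=
  let ancestors := topics.foldl (fun acc t => travA 20 t 0 acc) []
  let ancestors := PySem.List.sorted ancestors (fun x => x.1) true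
  let ancestors := ancestors.map (fun x => x.2)
  dedupSeenA ancestors PySem.Set.empty

-- ===== PORT B =====
-- B's `while stack` loop; stack head = top; pushing the reversed child list element by
-- element is the foldl below.  Fuel (one unit per pop) only makes the loop total; 64 ≥ the
-- ≤ 20 pops any single key of the fixed DAG needs.
def stackLoopB (fuel : Nat) (stack : List (String × Int)) (acc : List (Int × String)) : List (Int × String) :=
  match fuel, stack with
  | 0, _ => acc
  | _ + 1, [] => acc
  | f + 1, (t, level) :: rest =>
      stackLoopB f
        ((leetcode_topic_tree.getD t []).reverse.foldl (fun st c => (c, level + 1) :: st) rest)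
        (acc ++ [(level, t)])

def get_topic_ancestors_alt (topics : List String) : List String :=
  let ancestors := topics.foldl (fun acc t => stackLoopB 64 [(t, 0)] acc) []
  let ordered := PySem.List.sorted ancestors (fun x => x.1) true
  PySem.List.dedup (ordered.map (fun x => x.2))

-- ===== PRECONDITION & SPEC =====
-- Pre_ excludes topics that are not keys of the fixed dict: there Python A raises KeyError.
def Pre_get_topic_ancestors (topics : List String) : Prop :=
  (topics.all (fun t => leetcode_topic_tree.contains t)) = true
instance (topics : List String) : Decidable (Pre_get_topic_ancestors topics) := by
  unfold Pre_get_topic_ancestors; infer_instance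

def pvWitness_get_topic_ancestors : List String := ["math & geometry", "stacks"]

def Spec_get_topic_ancestors (topics : List String) (out : List String) : Prop :=
  out = get_topic_ancestors_alt topics
instance (topics : List String) (out : List String) : Decidable (Spec_get_topic_ancestors topics out) := by
  unfold Spec_get_topic_ancestors; infer_instance

-- ===== CLAIM (what is proved, stated in full; the proofs are below) =====
def Claim_equal_get_topic_ancestors : Prop := ∀ (topics : List String), Dom_get_topic_ancestors topics → Pre_get_topic_ancestors topics → Spec_get_topic_ancestors topics (get_topic_ancestors topics)

-- ===== LEMMAS AND PROOFS =====

theorem travA_acc (fuel : Nat) (t : String) (l : Int) (acc : List (Int × String)) :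
    travA fuel t l acc = acc ++ travA fuel t l [] := by
  induction fuel generalizing t l acc with
  | zero => simp [travA]
  | succ f ih =>
      have hcong : ∀ (init : List (Int × String)),
          (leetcode_topic_tree.getD t []).foldl (fun a c => travA f c (l + 1) a) init
            = init ++ (leetcode_topic_tree.getD t []).flatMap (fun c => travA f c (l + 1) []) := by
        intro init
        rw [PySem.List.foldl_congr_mem _ _ (fun a c => a ++ travA f c (l + 1) []) init
              (fun a c _ => ih c (l + 1) a),
            PySem.List.foldl_append_eq_flatMap]
      show travA (f + 1) t l acc = acc ++ travA (f + 1) t l []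
      rw [travA, travA, hcong, hcong]
      simp

theorem stackLoopB_acc (fuel : Nat) (S : List (String × Int)) (acc : List (Int × String)) :
    stackLoopB fuel S acc = acc ++ stackLoopB fuel S [] := by
  induction fuel generalizing S acc with
  | zero => simp [stackLoopB]
  | succ f ih =>
      cases S with
      | nil => simp [stackLoopB]
      | cons p rest =>
          obtain ⟨t, l⟩ := p
          show stackLoopB f _ (acc ++ [(l, t)]) = acc ++ stackLoopB f _ ([] ++ [(l, t)])
          rw [ih _ (acc ++ [(l, t)]), ih _ ([] ++ [(l, t)])]
          simp

theorem per_topic_eq (t : String) : travA 20 t 0 [] = stackLoopB 64 [(t, 0)] [] := by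
  by_cases h1 : t = "intervals"; · subst h1; decide
  by_cases h2 : t = "greedy algorithms"; · subst h2; decide
  by_cases h3 : t = "advanced graphs"; · subst h3; decide
  by_cases h4 : t = "math & geometry"; · subst h4; decide
  by_cases h5 : t = "2D dynamic programming"; · subst h5; decide
  by_cases h6 : t = "bit manipulation"; · subst h6; decide
  by_cases h7 : t = "heaps/priority queues"; · subst h7; decide
  by_cases h8 : t = "graphs"; · subst h8; decide
  by_cases h9 : t = "1D dynamic programming"; · subst h9; decide
  by_cases h10 : t = "tries"; · subst h10; decide
  by_cases h11 : t = "backtracking"; · subst h11; decide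
  by_cases h12 : t = "trees"; · subst h12; decide
  by_cases h13 : t = "binary search"; · subst h13; decide
  by_cases h14 : t = "sliding window"; · subst h14; decide
  by_cases h15 : t = "linked lists"; · subst h15; decide
  by_cases h16 : t = "two pointers"; · subst h16; decide
  by_cases h17 : t = "stacks"; · subst h17; decide
  by_cases h18 : t = "arrays & hashing"; · subst h18; decide
  have hk : leetcode_topic_tree.keys = ["intervals", "greedy algorithms", "advanced graphs",
      "math & geometry", "2D dynamic programming", "bit manipulation", "heaps/priority queues",
      "graphs", "1D dynamic programming", "tries", "backtracking", "trees", "binary search",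
      "sliding window", "linked lists", "two pointers", "stacks", "arrays & hashing"] := by decide
  have hc : leetcode_topic_tree.contains t = false := by
    rw [PySem.Dict.contains_eq_decide_mem_keys, hk]
    simp [h1, h2, h3, h4, h5, h6, h7, h8, h9, h10, h11, h12, h13, h14, h15, h16, h17, h18]
  have hnone : leetcode_topic_tree.getD t [] = [] :=
    PySem.Dict.getD_of_not_contains _ _ hc
  simp [travA, stackLoopB, hnone]

theorem anc_eq (topics : List String) (acc : List (Int × String)) :
    topics.foldl (fun acc t => travA 20 t 0 acc) acc
      = topics.foldl (fun acc t => stackLoopB 64 [(t, 0)] acc) acc := by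
  induction topics generalizing acc with
  | nil => rfl
  | cons t rest ih =>
      show rest.foldl _ (travA 20 t 0 acc) = rest.foldl _ (stackLoopB 64 [(t, 0)] acc)
      rw [travA_acc, per_topic_eq t, ← stackLoopB_acc]
      exact ih _

theorem dedupSeenA_eq_filter (xs : List String) (seen : PySem.Set String) :
    dedupSeenA xs seen
      = (PySem.Set.ofList xs).filter (fun y => !(PySem.Set.contains seen y)) := by
  induction xs generalizing seen with
  | nil => rfl
  | cons x rest ih =>
      rw [PySem.Set.ofList_cons]
      by_cases hx : PySem.Set.contains seen x
      · rw [dedupSeenA, if_pos hx, ih seen]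
        simp only [PySem.Set.discard, List.filter_cons, List.filter_filter]
        rw [if_neg (by simp [(PySem.Set.contains_iff seen x).mp hx])]
        apply List.filter_congr
        intro y _
        by_cases hyx : y = x
        · subst hyx; simp [(PySem.Set.contains_iff seen y).mp hx]
        · simp [hyx]
      · have hxm : x ∉ seen := by
          intro hm; exact hx ((PySem.Set.contains_iff seen x).mpr hm)
        rw [dedupSeenA, if_neg hx, ih (PySem.Set.add seen x), PySem.Set.add_of_not_mem hxm]
        rw [List.filter_cons, if_pos (by simp [hxm])]
        congr 1
        simp only [PySem.Set.discard, List.filter_filter]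
        apply List.filter_congr
        intro y _
        by_cases hyx : y = x
        · subst hyx; simp
        · simp [hyx]

theorem dedupSeenA_empty (xs : List String) :
    dedupSeenA xs PySem.Set.empty = PySem.List.dedup xs := by
  rw [dedupSeenA_eq_filter, PySem.List.dedup_eq_ofList]
  simp [PySem.Set.empty, PySem.Set.contains]

-- ===== VERDICT (by name: the statement is the Claim_ definition above) =====
theorem get_topic_ancestors_spec : Claim_equal_get_topic_ancestors := by
  intro topics _ _
  show get_topic_ancestors topics = get_topic_ancestors_alt topics
  unfold get_topic_ancestors get_topic_ancestors_alt
  rw [anc_eq, dedupSeenA_empty]
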